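-- pv_equiv track=rewrite | github.com/medvedit/Python_GB | Seminar/Seminar_5_parallel_group.py | ascending_sequence
-- ===== SOURCE A (Python) =====
-- def ascending_sequence(in_list: list) -> list:
--     out_list = []
--     for i in range(len(in_list)):
--         temp = in_list[i]
--         temp_list = [temp]
--         for j in range(i + 1, len(in_list)):
--             if in_list[j] > temp:
--                 temp = in_list[j]
--                 temp_list.append(temp)
--         if len(temp_list) > 1:
--             out_list.append(temp_list)
--     return out_list
-- ===== SOURCE B (Python) =====
-- def _chain(suffix):
--     # prefix maxima of the suffix (a non-decreasing stream)
--     maxes = suffix[:1]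
--     for v in suffix[1:]:
--         maxes.append(maxes[-1] if maxes[-1] >= v else v)
--     # collapse runs of equal consecutive values, keeping the first of each run
--     return [v for k, v in enumerate(maxes) if k == 0 or v != maxes[k - 1]]
--
--
-- def ascending_sequence(in_list: list) -> list:
--     return [c for c in (_chain(in_list[i:]) for i in range(len(in_list)))
--             if len(c) > 1]
-- ===== Notes on version B (the rewrite author's own statement) =====
-- stated objective: alternative
-- what changed: Replaces the track-temp/compare inner loop by a two-pass decomposition per start index: build the prefix-maxima stream of the suffix, then collapse runs of equal consecutive values; the outer loop becomes a comprehension filter on chain length.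
import Mathlib
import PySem

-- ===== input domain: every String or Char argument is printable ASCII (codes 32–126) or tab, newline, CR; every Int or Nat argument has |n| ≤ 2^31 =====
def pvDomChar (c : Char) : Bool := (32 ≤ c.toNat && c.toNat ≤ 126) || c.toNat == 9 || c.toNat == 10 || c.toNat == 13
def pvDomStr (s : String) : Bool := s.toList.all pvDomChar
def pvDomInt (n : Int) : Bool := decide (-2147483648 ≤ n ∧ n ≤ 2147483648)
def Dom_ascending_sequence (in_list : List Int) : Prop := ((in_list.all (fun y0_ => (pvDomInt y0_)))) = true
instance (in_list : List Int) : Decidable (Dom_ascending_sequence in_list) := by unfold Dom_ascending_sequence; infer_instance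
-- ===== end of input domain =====

-- B replaces A's track-temp/compare inner loop by prefix-maxima + collapse-equal-runs per
-- start index (objective: alternative decomposition, same asymptotic cost).

-- ===== PORT A =====
-- indices produced by pyRange 0/ i+1 .. len are always in range, so pyGetD with default 0
-- computes exactly what in_list[i] / in_list[j] does in Python (no IndexError possible)
def ascending_sequence (in_list : List Int) : List (List Int) :=
  (PySem.List.pyRange 0 (PySem.List.len in_list) 1).foldl (fun out_list i =>
    let temp := PySem.List.pyGetD in_list i 0
    let st := (PySem.List.pyRange (i + 1) (PySem.List.len in_list) 1).foldl
      (fun s j =>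
        let v := PySem.List.pyGetD in_list j 0
        if v > s.1 then (v, s.2 ++ [v]) else s) (temp, [temp])
    if st.2.length > 1 then out_list ++ [st.2] else out_list) []

-- ===== PORT B =====
-- prefix maxima of the tail, seeded with the head (the 'maxes' loop of Source B)
def pvPmax : Int → List Int → List Int
  | _, [] => []
  | cur, y :: t => (if cur ≥ y then cur else y) :: pvPmax (if cur ≥ y then cur else y) t

-- keep the first element of each run of equal consecutive values (Source B's dedup pass,
-- transcribed as a recursion carrying the previous value instead of indexing maxes[k-1])
def pvCollapse : Int → List Int → List Int
  | _, [] => []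
  | prev, z :: t => if z ≠ prev then z :: pvCollapse z t else pvCollapse prev t

def pvChain : List Int → List Int
  | [] => []
  | x :: rest => x :: pvCollapse x (pvPmax x rest)

def ascending_sequence_alt (in_list : List Int) : List (List Int) :=
  ((PySem.List.pyRange 0 (PySem.List.len in_list) 1).map
      (fun i => pvChain (PySem.List.slice in_list (some i) none))).filter
    (fun c => c.length > 1)

-- ===== PRECONDITION & SPEC =====
def Spec_ascending_sequence (in_list : List Int) (out : List (List Int)) : Prop := out = ascending_sequence_alt in_list
instance (in_list : List Int) (out : List (List Int)) : Decidable (Spec_ascending_sequence in_list out) := by unfold Spec_ascending_sequence; infer_instance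

-- ===== CLAIM (what is proved, stated in full; the proofs are below) =====
def Claim_equal_ascending_sequence : Prop := ∀ (in_list : List Int), Dom_ascending_sequence in_list → Spec_ascending_sequence in_list (ascending_sequence in_list)

-- ===== LEMMAS AND PROOFS =====

-- A's inner loop, abstracted on the suffix it scans
def pvLoopA : Int → List Int → List Int
  | _, [] => []
  | cur, y :: t => if y > cur then y :: pvLoopA y t else pvLoopA cur t

theorem pvFold_inner (rest : List Int) : ∀ (cur : Int) (acc : List Int),
    (rest.foldl (fun s y => if y > s.1 then (y, s.2 ++ [y]) else s) (cur, acc)).2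
      = acc ++ pvLoopA cur rest := by
  induction rest with
  | nil => intro cur acc; simp [pvLoopA]
  | cons y t ih =>
    intro cur acc
    simp only [List.foldl, pvLoopA]
    by_cases h : y > cur
    · simp [h, ih]
    · simp [h, ih]

theorem pvLoopA_eq_collapse (rest : List Int) : ∀ cur : Int,
    pvLoopA cur rest = pvCollapse cur (pvPmax cur rest) := by
  induction rest with
  | nil => intro cur; simp [pvLoopA, pvPmax, pvCollapse]
  | cons y t ih =>
    intro cur
    by_cases h : y > cur
    · have h1 : ¬ cur ≥ y := by omega
      have h2 : y ≠ cur := by omega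
      simp [pvLoopA, pvPmax, pvCollapse, h, h1, h2, ih]
    · have h1 : cur ≥ y := by omega
      simp [pvLoopA, pvPmax, pvCollapse, h, h1, ih]

theorem pvInner_eq_chain (in_list : List Int) (i : Int) (h0 : 0 ≤ i)
    (hn : i < (in_list.length : Int)) :
    ((PySem.List.pyRange (i + 1) (PySem.List.len in_list) 1).foldl
        (fun s j =>
          let v := PySem.List.pyGetD in_list j 0
          if v > s.1 then (v, s.2 ++ [v]) else s)
        (PySem.List.pyGetD in_list i 0, [PySem.List.pyGetD in_list i 0])).2
      = pvChain (PySem.List.slice in_list (some i) none) := by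
  set temp := PySem.List.pyGetD in_list i 0 with htemp
  have hlt : i.toNat < in_list.length := by omega
  have hdrop : in_list.drop i.toNat = temp :: in_list.drop (i + 1).toNat := by
    have h1 : (i + 1).toNat = i.toNat + 1 := by omega
    rw [h1, htemp, PySem.List.pyGetD_eq_getElem in_list 0 h0 (by exact_mod_cast hn)]
    rw [List.drop_eq_getElem_cons hlt]
  have hfold := PySem.List.foldl_pyRange_pyGetD in_list 0
      (fun s y => if y > s.1 then (y, s.2 ++ [y]) else s) (temp, [temp]) (a := i + 1) (by omega)
  show ((PySem.List.pyRange (i + 1) (PySem.List.len in_list) 1).foldl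
        (fun s j => (fun s y => if y > s.1 then (y, s.2 ++ [y]) else s) s (PySem.List.pyGetD in_list j 0))
        (temp, [temp])).2 = _
  rw [hfold, pvFold_inner, PySem.List.slice_from in_list h0, hdrop, pvChain,
      pvLoopA_eq_collapse]
  simp

theorem pvOuter (in_list : List Int) (l : List Int)
    (hl : ∀ i ∈ l, 0 ≤ i ∧ i < (in_list.length : Int)) (acc : List (List Int)) :
    l.foldl (fun out_list i =>
        let temp := PySem.List.pyGetD in_list i 0
        let st := (PySem.List.pyRange (i + 1) (PySem.List.len in_list) 1).foldl
          (fun s j =>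
            let v := PySem.List.pyGetD in_list j 0
            if v > s.1 then (v, s.2 ++ [v]) else s) (temp, [temp])
        if st.2.length > 1 then out_list ++ [st.2] else out_list) acc
      = acc ++ (l.map (fun i => pvChain (PySem.List.slice in_list (some i) none))).filter
          (fun c => c.length > 1) := by
  induction l generalizing acc with
  | nil => simp
  | cons i t ih =>
    have hi := hl i (by simp)
    have hstep := pvInner_eq_chain in_list i hi.1 hi.2
    simp only [List.foldl, List.map, List.filter]
    rw [ih (fun j hj => hl j (by simp [hj]))]
    simp only [hstep]
    by_cases h : (pvChain (PySem.List.slice in_list (some i) none)).length > 1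
    · simp [h]
    · simp [h]

-- ===== VERDICT (by name: the statement is the Claim_ definition above) =====
theorem ascending_sequence_spec : Claim_equal_ascending_sequence := by
  intro in_list _
  unfold Spec_ascending_sequence ascending_sequence ascending_sequence_alt
  rw [pvOuter in_list _ (fun i hi => by
        rw [PySem.List.mem_pyRange_one] at hi
        exact ⟨hi.1, by simpa using hi.2⟩) []]
  simp
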